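-- pv_equiv track=rewrite | github.com/shane-mason/chapter-marker-thingy | cmthingy.py | calculate_ideal_breaks
-- ===== SOURCE A (Python) =====
-- def calculate_ideal_breaks(video_duration, target_minutes=8):
--     ideal_positions = []
--     interval = target_minutes * 60
--     position = interval
--     while position < video_duration - 60:
--         ideal_positions.append(position)
--         position += interval
--     return ideal_positions
-- ===== SOURCE B (Python) =====
-- def calculate_ideal_breaks(video_duration, target_minutes=8):
--     interval = target_minutes * 60
--     if interval <= 0:
--         return []
--     n = max(0, -((60 - video_duration) // interval) - 1)
--     return [k * interval for k in range(1, n + 1)]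
-- ===== Notes on version B (the rewrite author's own statement) =====
-- stated objective: alternative
-- what changed: Replaced the accumulate-while-below-threshold loop by a closed-form ceiling-division count of breaks plus direct generation of the multiples; Pre_ excludes non-positive intervals with the threshold still ahead, where A loops forever.
import Mathlib
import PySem

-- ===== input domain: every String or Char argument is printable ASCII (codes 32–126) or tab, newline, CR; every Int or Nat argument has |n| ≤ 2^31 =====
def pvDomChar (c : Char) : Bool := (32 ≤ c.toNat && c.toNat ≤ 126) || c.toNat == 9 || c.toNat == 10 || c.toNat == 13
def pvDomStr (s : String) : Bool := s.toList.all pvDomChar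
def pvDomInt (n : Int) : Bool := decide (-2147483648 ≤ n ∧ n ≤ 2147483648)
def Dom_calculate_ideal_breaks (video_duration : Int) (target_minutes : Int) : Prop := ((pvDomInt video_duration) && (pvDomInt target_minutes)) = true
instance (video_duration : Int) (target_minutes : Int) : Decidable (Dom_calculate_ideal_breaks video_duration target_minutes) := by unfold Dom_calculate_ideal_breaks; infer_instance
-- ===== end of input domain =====

-- B replaces the accumulation loop by a closed-form break count (ceiling division) plus direct
-- generation of the interval multiples; equivalence is proved on all inputs where A terminates.

-- ===== PORT A =====
-- the while loop of A; the inner 0 < interval guard only makes the recursion total: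
-- when it fails Python's loop never terminates (outside Pre_), so nothing is claimed there
def pvLoopA (vd interval position : Int) (acc : List Int) : List Int :=
  if _h : position < vd - 60 then
    if _hi : 0 < interval then
      pvLoopA vd interval (position + interval) (acc ++ [position])
    else acc
  else acc
termination_by (vd - 60 - position).toNat
decreasing_by omega

def calculate_ideal_breaks (video_duration : Int) (target_minutes : Int) : List Int :=
  pvLoopA video_duration (target_minutes * 60) (target_minutes * 60) []

-- ===== PORT B =====
def calculate_ideal_breaks_alt (video_duration : Int) (target_minutes : Int) : List Int :=
  let interval := target_minutes * 60
  if interval ≤ 0 then []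
  else
    let n := max 0 (-(PySem.Int.floordiv (60 - video_duration) interval) - 1)
    (PySem.List.pyRange 1 (n + 1) 1).map (fun k => k * interval)

-- ===== PRECONDITION & SPEC =====
-- Pre_ excludes exactly the inputs on which A's while loop never terminates:
-- interval = target_minutes*60 ≤ 0 while the threshold video_duration - 60 is still ahead.
def Pre_calculate_ideal_breaks (video_duration : Int) (target_minutes : Int) : Prop :=
  0 < target_minutes ∨ video_duration - 60 ≤ target_minutes * 60
instance (video_duration : Int) (target_minutes : Int) : Decidable (Pre_calculate_ideal_breaks video_duration target_minutes) := by unfold Pre_calculate_ideal_breaks; infer_instance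

def pvWitness_calculate_ideal_breaks : Int × Int := (3600, 8)

def Spec_calculate_ideal_breaks (video_duration : Int) (target_minutes : Int) (out : List Int) : Prop := out = calculate_ideal_breaks_alt video_duration target_minutes
instance (video_duration : Int) (target_minutes : Int) (out : List Int) : Decidable (Spec_calculate_ideal_breaks video_duration target_minutes out) := by unfold Spec_calculate_ideal_breaks; infer_instance

-- ===== CLAIM (what is proved, stated in full; the proofs are below) =====
def Claim_equal_calculate_ideal_breaks : Prop := ∀ (video_duration : Int) (target_minutes : Int), Dom_calculate_ideal_breaks video_duration target_minutes → Pre_calculate_ideal_breaks video_duration target_minutes → Spec_calculate_ideal_breaks video_duration target_minutes (calculate_ideal_breaks video_duration target_minutes)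

-- ===== LEMMAS AND PROOFS =====

-- number of iterations the loop performs starting at `position`
def pvCnt (vd i position : Int) : Nat := (-(PySem.Int.floordiv (position + 60 - vd) i)).toNat

lemma pvCnt_step (vd i p : Int) (hi : 0 < i) (h : p < vd - 60) :
    pvCnt vd i p = pvCnt vd i (p + i) + 1 := by
  unfold pvCnt
  have hq := (PySem.Int.floordiv_eq_iff_of_pos (a := p + 60 - vd) (b := i)
      (q := PySem.Int.floordiv (p + 60 - vd) i) hi).mp rfl
  set q := PySem.Int.floordiv (p + 60 - vd) i with hqdef
  have hq2 : PySem.Int.floordiv (p + i + 60 - vd) i = q + 1 := by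
    rw [PySem.Int.floordiv_eq_iff_of_pos hi]
    constructor <;> nlinarith [hq.1, hq.2]
  have hqneg : q < 0 := by
    rw [hqdef, PySem.Int.floordiv_lt_iff_lt_mul hi]
    nlinarith
  rw [hq2]
  omega

lemma pvCnt_zero (vd i p : Int) (hi : 0 < i) (h : ¬ p < vd - 60) :
    pvCnt vd i p = 0 := by
  unfold pvCnt
  have : 0 ≤ PySem.Int.floordiv (p + 60 - vd) i := by
    rw [PySem.Int.le_floordiv_iff_mul_le hi]
    nlinarith
  omega

lemma pvLoopA_eq (vd i : Int) (hi : 0 < i) (p : Int) (acc : List Int) :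
    pvLoopA vd i p acc = acc ++ (List.range (pvCnt vd i p)).map (fun (j : Nat) => p + i * (j : Int)) := by
  by_cases h : p < vd - 60
  · rw [pvLoopA, dif_pos h, dif_pos hi]
    rw [pvLoopA_eq vd i hi (p + i) (acc ++ [p])]
    rw [pvCnt_step vd i p hi h, List.range_succ_eq_map, List.map_cons, List.map_map]
    simp only [Nat.cast_zero, mul_zero, add_zero, List.append_assoc, List.singleton_append]
    congr 2
    apply List.map_congr_left
    intro j _
    simp only [Function.comp_apply]
    push_cast
    ring
  · rw [pvLoopA, dif_neg h, pvCnt_zero vd i p hi h]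
    simp
termination_by (vd - 60 - p).toNat
decreasing_by omega

-- ===== VERDICT (by name: the statement is the Claim_ definition above) =====
theorem calculate_ideal_breaks_spec : Claim_equal_calculate_ideal_breaks := by
  intro vd tm _hdom hpre
  unfold Spec_calculate_ideal_breaks calculate_ideal_breaks calculate_ideal_breaks_alt
  by_cases hi : tm * 60 ≤ 0
  · have hnot : ¬ (tm * 60 < vd - 60) := by
      rcases hpre with h | h
      · omega
      · omega
    rw [pvLoopA]
    simp [hnot, hi]
  · push Not at hi
    rw [pvLoopA_eq vd (tm * 60) hi (tm * 60) []]
    have hstep : PySem.Int.floordiv (tm * 60 + 60 - vd) (tm * 60)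
        = PySem.Int.floordiv (60 - vd) (tm * 60) + 1 := by
      have hq := (PySem.Int.floordiv_eq_iff_of_pos (a := 60 - vd) (b := tm * 60)
          (q := PySem.Int.floordiv (60 - vd) (tm * 60)) hi).mp rfl
      rw [PySem.Int.floordiv_eq_iff_of_pos hi]
      constructor <;> nlinarith [hq.1, hq.2]
    simp only [if_neg (by omega : ¬ tm * 60 ≤ 0), List.nil_append]
    rw [PySem.List.pyRange_one, List.map_map]
    unfold pvCnt
    rw [hstep]
    have hlen : (-(PySem.Int.floordiv (60 - vd) (tm * 60) + 1)).toNat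
        = (max 0 (-PySem.Int.floordiv (60 - vd) (tm * 60) - 1) + 1 - 1).toNat := by omega
    rw [hlen]
    apply List.map_congr_left
    intro j _
    simp only [Function.comp_apply]
    ring
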